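-- pv_equiv track=rewrite | github.com/simskij/advent-of-code | 2021/day09/solution.py | solve_gold
-- ===== SOURCE A (Python) =====
-- import math
--
-- NEIGHBOURS = (0, 1), (0, -1), (1, 0), (-1, 0)
--
-- def solve_gold(rows, low_points) -> int:
--     seen = set()
--     sizes = []
--     candidates = []
--     for y, x in low_points:
--         if (y, x) in seen:
--             continue
--         seen.add((y, x))
--         candidates.append([y, x])
--         size = 0
--         while candidates:
--             size += 1
--             y, x = candidates.pop()
--
--             for ay, ax in NEIGHBOURS:
--                 if y + ay < 0 or y + ay >= len(rows):
--                     continue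
--                 if x + ax < 0 or x + ax >= len(rows[y]):
--                     continue
--                 if rows[y+ay][x+ax] == 9:
--                     continue
--                 if rows[y+ay][x+ax] <= rows[y][x]:
--                     continue
--                 if (y+ay, x+ax) in seen:
--                     continue
--
--                 candidates.append([y+ay, x+ax])
--                 seen.add((y+ay, x+ax))
--         sizes.append(size)
--     return math.prod(sorted(sizes, reverse=True)[:3])
-- ===== SOURCE B (Python) =====
-- import math
--
--
-- def solve_gold(rows, low_points) -> int:
--     # BFS over an index-scanned queue: neighbours are enqueued unconditionally
--     # (bounds/height checks only) and filtered lazily against `seen` when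
--     # dequeued, instead of A's eager mark-at-push DFS stack.
--     seen = set()
--     sizes = []
--     for start in low_points:
--         if start in seen:
--             continue
--         queue = [start]
--         i = 0
--         size = 0
--         while i < len(queue):
--             y, x = queue[i]
--             i += 1
--             if (y, x) in seen:
--                 continue
--             seen.add((y, x))
--             size += 1
--             for ny, nx in ((y - 1, x), (y + 1, x), (y, x - 1), (y, x + 1)):
--                 if (0 <= ny < len(rows) and 0 <= nx < len(rows[ny])
--                         and rows[ny][nx] != 9 and rows[ny][nx] > rows[y][x]):
--                     queue.append((ny, nx))
--         sizes.append(size)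
--     return math.prod(sorted(sizes, reverse=True)[:3])
-- ===== Notes on version B (the rewrite author's own statement) =====
-- stated objective: alternative
-- what changed: A's eager DFS (explicit stack, cells marked seen when pushed, push only unseen qualifying neighbours) is replaced by an index-scanned BFS queue that enqueues every in-bounds qualifying neighbour unconditionally and filters lazily against seen at dequeue time, marking and counting cells only when dequeued; the result is equal because both compute the same closure of the low point under the strictly-increasing non-9 neighbour relation.
-- outside the precondition, e.g. on solve_gold([[121, 9], [9], [0, 6], [9, 4]], [(1, 1), (2, 4), (6, 4)]): A returns 1, B raises IndexError; on solve_gold([[1, 9, 9], [4]], [(0, 0)]): A returns 2, B returns 2; on solve_gold([[9]], [(0, 1)]): A returns 1, B returns 1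
import Mathlib
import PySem

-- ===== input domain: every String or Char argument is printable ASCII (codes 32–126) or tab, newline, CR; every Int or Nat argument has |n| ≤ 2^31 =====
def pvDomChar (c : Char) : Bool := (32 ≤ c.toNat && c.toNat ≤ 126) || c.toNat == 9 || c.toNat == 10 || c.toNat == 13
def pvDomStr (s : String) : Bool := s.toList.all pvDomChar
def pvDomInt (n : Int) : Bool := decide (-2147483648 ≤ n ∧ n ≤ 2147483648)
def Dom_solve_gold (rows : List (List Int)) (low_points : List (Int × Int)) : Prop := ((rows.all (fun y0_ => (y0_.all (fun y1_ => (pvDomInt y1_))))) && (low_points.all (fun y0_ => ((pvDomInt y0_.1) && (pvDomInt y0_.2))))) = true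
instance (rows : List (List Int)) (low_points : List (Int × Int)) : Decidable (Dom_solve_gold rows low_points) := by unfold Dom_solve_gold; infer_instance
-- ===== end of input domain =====

-- B replaces A's eager DFS (stack, mark-on-push, push only unseen neighbours) by an
-- index-scanned BFS queue that enqueues every qualifying neighbour unconditionally and
-- filters lazily against `seen` at dequeue time; same return value, no speed claim.

-- ===== PORT A =====
-- NEIGHBOURS
def pvNbrs : List (Int × Int) := [(0, 1), (0, -1), (1, 0), (-1, 0)]

-- rows[y] / rows[y][x] with Python (negative-wrapping) indexing; the defaults are
-- unreachable on inputs admitted by Pre_solve_gold (all accesses are in range there)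
def pvRow (rows : List (List Int)) (y : Int) : List Int := PySem.List.pyGetD rows y []
def pvVal (rows : List (List Int)) (y x : Int) : Int := PySem.List.pyGetD (pvRow rows y) x 0

-- the `for ay, ax in NEIGHBOURS` body of A's while loop: push/mark eligible neighbours
def pvStepA (rows : List (List Int)) (y x : Int)
    (st : List (Int × Int) × PySem.Set (Int × Int)) : List (Int × Int) × PySem.Set (Int × Int) :=
  pvNbrs.foldl (fun st d =>
    if y + d.1 < 0 ∨ (rows.length : Int) ≤ y + d.1 then st
    else if x + d.2 < 0 ∨ ((pvRow rows y).length : Int) ≤ x + d.2 then st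
    else if pvVal rows (y + d.1) (x + d.2) = 9 then st
    else if pvVal rows (y + d.1) (x + d.2) ≤ pvVal rows y x then st
    else if (y + d.1, x + d.2) ∈ st.2 then st
    else ((y + d.1, x + d.2) :: st.1, PySem.Set.add st.2 (y + d.1, x + d.2))) st

-- A's `while candidates:` loop; the candidates stack has its top at the list head
-- (append = cons, pop = head).  The fuel only makes the loop total: one unit per
-- iteration, and the fuel passed below exceeds any possible number of iterations.
def pvWhileA (rows : List (List Int)) :
    Nat → List (Int × Int) → PySem.Set (Int × Int) → Int → Int × PySem.Set (Int × Int)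
  | _, [], seen, size => (size, seen)
  | 0, _ :: _, seen, size => (size, seen)   -- fuel exhausted: never reached from solve_gold
  | fuel + 1, c :: cand, seen, size =>
      let st := pvStepA rows c.1 c.2 (cand, seen)
      pvWhileA rows fuel st.1 st.2 (size + 1)

def pvFuel (rows : List (List Int)) (low_points : List (Int × Int)) : Nat :=
  (rows.map List.length).sum + low_points.length + 1

-- A's `for y, x in low_points:` loop, threading (sizes, seen)
def pvLoopA (rows : List (List Int)) (fuel : Nat) :
    List (Int × Int) → List Int × PySem.Set (Int × Int) → List Int × PySem.Set (Int × Int)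
  | [], st => st
  | p :: ps, st =>
      if p ∈ st.2 then pvLoopA rows fuel ps st
      else
        let r := pvWhileA rows fuel [p] (PySem.Set.add st.2 p) 0
        pvLoopA rows fuel ps (st.1 ++ [r.1], r.2)

def solve_gold (rows : List (List Int)) (low_points : List (Int × Int)) : Int :=
  let sizes := (pvLoopA rows (pvFuel rows low_points) low_points ([], PySem.Set.empty)).1
  (PySem.List.slice (PySem.List.sorted sizes (fun z => z) true) none (some 3)).foldl (· * ·) 1

-- ===== PORT B =====
-- B's inner `for ny, nx in ((y-1,x),...)` loop over one dequeued cell: append every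
-- in-bounds, non-9, strictly higher neighbour to the queue (no `seen` check here)
def pvQStep (rows : List (List Int)) (y x : Int) (q : List (Int × Int)) : List (Int × Int) :=
  [(y - 1, x), (y + 1, x), (y, x - 1), (y, x + 1)].foldl (fun acc n =>
    if 0 ≤ n.1 ∧ n.1 < (rows.length : Int) ∧ 0 ≤ n.2 ∧
        n.2 < ((PySem.List.pyGetD rows n.1 []).length : Int) ∧
        PySem.List.pyGetD (PySem.List.pyGetD rows n.1 []) n.2 0 ≠ 9 ∧
        PySem.List.pyGetD (PySem.List.pyGetD rows y []) x 0 <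
          PySem.List.pyGetD (PySem.List.pyGetD rows n.1 []) n.2 0
    then acc ++ [n] else acc) q

-- B's `while i < len(queue):` scan: the unscanned part of the queue is the list; cells
-- already seen are skipped, otherwise marked, counted and their neighbours enqueued at
-- the back.  The fuel only makes the loop total and is never exhausted from solve_gold_alt.
def pvBFS (rows : List (List Int)) :
    Nat → List (Int × Int) → PySem.Set (Int × Int) → Int → Int × PySem.Set (Int × Int)
  | _, [], seen, size => (size, seen)
  | 0, _ :: _, seen, size => (size, seen)   -- fuel exhausted: unreachable from solve_gold_alt
  | fuel + 1, c :: rest, seen, size =>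
      if c ∈ seen then pvBFS rows fuel rest seen size
      else pvBFS rows fuel (pvQStep rows c.1 c.2 rest) (PySem.Set.add seen c) (size + 1)

def pvFuelB (rows : List (List Int)) (low_points : List (Int × Int)) : Nat :=
  4 * (low_points.length + rows.length * (rows.headD []).length) + 4

def solve_gold_alt (rows : List (List Int)) (low_points : List (Int × Int)) : Int :=
  let st := low_points.foldl
    (fun (st : List Int × PySem.Set (Int × Int)) p =>
      if p ∈ st.2 then st
      else
        let r := pvBFS rows (pvFuelB rows low_points) [p] st.2 0
        (st.1 ++ [r.1], r.2))
    ([], PySem.Set.empty)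
  (PySem.List.slice (PySem.List.sorted st.1 (fun z => z) true) none (some 3)).foldl (· * ·) 1

-- ===== PRECONDITION & SPEC =====
def pvW (rows : List (List Int)) : Nat := (rows.headD []).length

def pvRect (rows : List (List Int)) : Prop := ∀ r ∈ rows, r.length = pvW rows

def pvGood (rows : List (List Int)) (c : Int × Int) : Prop :=
  -(rows.length : Int) ≤ c.1 ∧ c.1 < rows.length ∧ -(pvW rows : Int) ≤ c.2 ∧ c.2 < pvW rows

-- a low point whose four neighbours all fail the bounds checks before any cell of
-- rows is read: both programs count a one-cell basin there, whatever rows looks like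
def pvInertPt (rows : List (List Int)) (y x : Int) : Prop :=
  y ≤ -2 ∨ (rows.length : Int) + 1 ≤ y ∨ rows.length = 0 ∨
  (-(rows.length : Int) ≤ y ∧ y < rows.length ∧
    (x ≤ -2 ∨ (pvRect rows ∧ (pvW rows = 0 ∨ (pvW rows : Int) + 1 ≤ x))))

-- Pre_ admits every low point that is either far enough out of range to be inert (see
-- pvInertPt; A returns a one-cell basin there) or Python-indexable in a rectangular
-- grid (negative in-range coordinates, Python wraparound, stay inside Pre_).  It
-- excludes (i) low points on the narrow boundary band just outside the indexable
-- range (e.g. y = len(rows) or x = W), where A raises IndexError, and (ii) ragged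
-- grids with an in-range low point: A checks a neighbour's column against the CURRENT
-- row's length and then indexes the NEIGHBOUR row, so on ragged grids it usually
-- raises IndexError, and the exact raising set is not closed-form — where it happens
-- to return anyway, both programs agree (see the cites).
def Pre_solve_gold (rows : List (List Int)) (low_points : List (Int × Int)) : Prop :=
  ∀ p ∈ low_points, pvInertPt rows p.1 p.2 ∨ (pvRect rows ∧ pvGood rows p)

instance (rows : List (List Int)) (low_points : List (Int × Int)) :
    Decidable (Pre_solve_gold rows low_points) := by
  unfold Pre_solve_gold pvInertPt pvRect pvGood; infer_instance

def pvWitness_solve_gold : List (List Int) × (List (Int × Int)) :=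
  ([[1, 2], [3, 9]], [(0, 0)])

def Spec_solve_gold (rows : List (List Int)) (low_points : List (Int × Int)) (out : Int) : Prop := out = solve_gold_alt rows low_points
instance (rows : List (List Int)) (low_points : List (Int × Int)) (out : Int) : Decidable (Spec_solve_gold rows low_points out) := by unfold Spec_solve_gold; infer_instance

-- ===== CLAIM (what is proved, stated in full; the proofs are below) =====
def Claim_equal_solve_gold : Prop := ∀ (rows : List (List Int)) (low_points : List (Int × Int)), Dom_solve_gold rows low_points → Pre_solve_gold rows low_points → Spec_solve_gold rows low_points (solve_gold rows low_points)

-- ===== LEMMAS AND PROOFS =====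

def pvInGrid (rows : List (List Int)) (c : Int × Int) : Prop :=
  0 ≤ c.1 ∧ c.1 < rows.length ∧ 0 ≤ c.2 ∧ c.2 < pvW rows

def pvNbrOf (p q : Int × Int) : Prop :=
  q = (p.1 - 1, p.2) ∨ q = (p.1 + 1, p.2) ∨ q = (p.1, p.2 - 1) ∨ q = (p.1, p.2 + 1)

-- the one-step growth relation both flood fills close under
def pvValid (rows : List (List Int)) (p q : Int × Int) : Prop :=
  pvNbrOf p q ∧ pvInGrid rows q ∧ pvVal rows q.1 q.2 ≠ 9 ∧
    pvVal rows p.1 p.2 < pvVal rows q.1 q.2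

-- cells reachable from seed s by pvValid-steps avoiding `base` (the seen set at the
-- start of the basin, seed included); both basins compute exactly this set
inductive pvReach (rows : List (List Int)) (base : List (Int × Int)) (s : Int × Int) :
    Int × Int → Prop
  | seed : pvReach rows base s s
  | step (p q : Int × Int) : pvReach rows base s p → pvValid rows p q → q ∉ base →
      pvReach rows base s q

def pvClosed (rows : List (List Int)) (S : List (Int × Int)) : Prop :=
  ∀ r ∈ S, ∀ q, pvValid rows r q → q ∈ S

def pvInv (rows : List (List Int)) (lps : List (Int × Int))
    (seen : PySem.Set (Int × Int)) : Prop :=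
  seen.Nodup ∧ ∀ c ∈ seen, c ∈ lps ∨ pvInGrid rows c

theorem pvInGrid_good {rows : List (List Int)} {c : Int × Int}
    (h : pvInGrid rows c) : pvGood rows c := by
  obtain ⟨h1, h2, h3, h4⟩ := h
  exact ⟨by omega, h2, by omega, h4⟩

theorem pvRow_mem {rows : List (List Int)} {y : Int}
    (h1 : -(rows.length : Int) ≤ y) (h2 : y < rows.length) : pvRow rows y ∈ rows :=
  PySem.List.pyGetD_mem rows [] ⟨h1, h2⟩

theorem pvRow_len {rows : List (List Int)} {y : Int} (hR : pvRect rows)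
    (h1 : -(rows.length : Int) ≤ y) (h2 : y < rows.length) :
    (pvRow rows y).length = pvW rows :=
  hR _ (pvRow_mem h1 h2)

-- Set helpers
theorem pvMem_add_self (s : PySem.Set (Int × Int)) (a : Int × Int) :
    a ∈ PySem.Set.add s a := by
  by_cases h : a ∈ s
  · rw [PySem.Set.add_of_mem h]; exact h
  · rw [PySem.Set.add_of_not_mem h]; exact List.mem_append_right _ (by simp)

theorem pvMem_add_of_mem {s : PySem.Set (Int × Int)} {b : Int × Int} (a : Int × Int)
    (h : b ∈ s) : b ∈ PySem.Set.add s a := by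
  by_cases ha : a ∈ s
  · rw [PySem.Set.add_of_mem ha]; exact h
  · rw [PySem.Set.add_of_not_mem ha]; exact List.mem_append_left _ h

theorem pvMem_add_iff {s : PySem.Set (Int × Int)} {a b : Int × Int} :
    b ∈ PySem.Set.add s a ↔ b ∈ s ∨ b = a := by
  constructor
  · intro h
    by_cases ha : a ∈ s
    · rw [PySem.Set.add_of_mem ha] at h; exact Or.inl h
    · rw [PySem.Set.add_of_not_mem ha] at h
      rcases List.mem_append.mp h with h | h
      · exact Or.inl h
      · exact Or.inr (List.mem_singleton.mp h)
  · rintro (h | rfl)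
    · exact pvMem_add_of_mem _ h
    · exact pvMem_add_self _ _

theorem pvLen_add_of_not_mem {s : PySem.Set (Int × Int)} {a : Int × Int} (h : a ∉ s) :
    (PySem.Set.add s a).length = s.length + 1 := by
  rw [PySem.Set.add_of_not_mem h]; simp

theorem pvInv_add {rows : List (List Int)} {lps : List (Int × Int)}
    {seen : PySem.Set (Int × Int)} {p : Int × Int} (hI : pvInv rows lps seen)
    (hp : p ∉ seen) (hm : p ∈ lps ∨ pvInGrid rows p) :
    pvInv rows lps (PySem.Set.add seen p) := by
  rw [PySem.Set.add_of_not_mem hp]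
  constructor
  · simp only [List.nodup_append, List.nodup_cons, List.not_mem_nil, not_false_iff,
      List.nodup_nil, and_true, true_and]
    refine ⟨hI.1, ?_⟩
    intro a ha b hb
    rw [List.mem_singleton.mp hb]
    intro he; exact hp (he ▸ ha)
  · intro c hc
    rcases List.mem_append.mp hc with h | h
    · exact hI.2 c h
    · rw [List.mem_singleton.mp h]; exact hm

-- generic fold lemmas
theorem pvFoldl_inv {α σ : Type} (P : σ → Prop) (f : σ → α → σ) :
    ∀ (l : List α) (s : σ), P s → (∀ a ∈ l, ∀ t, P t → P (f t a)) → P (l.foldl f s) := by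
  intro l
  induction l with
  | nil => intro s h _; exact h
  | cons a l ih =>
      intro s h hs
      exact ih _ (hs a List.mem_cons_self _ h) (fun b hb => hs b (List.mem_cons_of_mem _ hb))

theorem pvFoldl_handle {α σ : Type} (Q : σ → Prop) (f : σ → α → σ)
    (hmono : ∀ t a, Q t → Q (f t a)) :
    ∀ (l : List α) (s : σ) (a : α), a ∈ l → (∀ t, Q (f t a)) → Q (l.foldl f s) := by
  intro l
  induction l with
  | nil => intro s a h _; simp at h
  | cons b l ih =>
      intro s a ha hQ
      rcases List.mem_cons.mp ha with rfl | ha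
      · exact pvFoldl_inv Q f l (f s a) (hQ s) (fun c _ t ht => hmono t c ht)
      · exact ih _ a ha hQ

theorem pvFoldl_id {α σ : Type} (f : σ → α → σ) :
    ∀ (l : List α) (s : σ), (∀ a ∈ l, ∀ t, f t a = t) → l.foldl f s = s := by
  intro l
  induction l with
  | nil => intro s _; rfl
  | cons a l ih =>
      intro s h
      rw [List.foldl_cons, h a List.mem_cons_self, ih]
      intro b hb t
      exact h b (List.mem_cons_of_mem _ hb) t

theorem pvSeen_bound {rows : List (List Int)} {lps : List (Int × Int)}
    {seen : PySem.Set (Int × Int)} (hI : pvInv rows lps seen) :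
    seen.length ≤ lps.length + rows.length * pvW rows := by
  obtain ⟨hnd, hmem⟩ := hI
  have h1 : seen.length = seen.toFinset.card := (List.toFinset_card_of_nodup hnd).symm
  have hsub : seen.toFinset ⊆ lps.toFinset ∪
      ((Finset.range rows.length) ×ˢ (Finset.range (pvW rows))).image
        (fun p => ((p.1 : Int), (p.2 : Int))) := by
    intro c hc
    rcases hmem c (List.mem_toFinset.mp hc) with h | h
    · exact Finset.mem_union_left _ (List.mem_toFinset.mpr h)
    · refine Finset.mem_union_right _ ?_
      obtain ⟨ha, hb, hcg, hd⟩ := h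
      refine Finset.mem_image.mpr ⟨(c.1.toNat, c.2.toNat), ?_, ?_⟩
      · refine Finset.mem_product.mpr ⟨Finset.mem_range.mpr ?_, Finset.mem_range.mpr ?_⟩ <;> omega
      · obtain ⟨c1, c2⟩ := c
        simp only [Prod.mk.injEq]
        constructor <;> simp <;> omega
  calc seen.length = seen.toFinset.card := h1
    _ ≤ _ := Finset.card_le_card hsub
    _ ≤ lps.toFinset.card + _ := Finset.card_union_le _ _
    _ ≤ lps.length + rows.length * pvW rows := by
        have h2 := List.toFinset_card_le lps
        have h3 := Finset.card_image_le (s := (Finset.range rows.length) ×ˢ (Finset.range (pvW rows)))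
          (f := fun p => ((p.1 : Int), (p.2 : Int)))
        simp only [Finset.card_product, Finset.card_range] at h3
        omega

theorem pvLen_eq_of_memb {l1 l2 : List (Int × Int)} (h1 : l1.Nodup) (h2 : l2.Nodup)
    (h : ∀ c, c ∈ l1 ↔ c ∈ l2) : l1.length = l2.length := by
  have : l1.toFinset = l2.toFinset := by
    ext c; simp only [List.mem_toFinset]; exact h c
  rw [← List.toFinset_card_of_nodup h1, ← List.toFinset_card_of_nodup h2, this]

theorem pvSumLen {rows : List (List Int)} (hR : pvRect rows) :
    (rows.map List.length).sum = rows.length * pvW rows := by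
  rw [List.sum_eq_card_nsmul (rows.map List.length) (pvW rows) ?_]
  · simp
  · intro n hn
    obtain ⟨r, hr, rfl⟩ := List.mem_map.mp hn
    exact hR r hr

theorem pvReach_congr {rows : List (List Int)} {b1 b2 : List (Int × Int)} {s c : Int × Int}
    (hb : ∀ x, x ∈ b1 ↔ x ∈ b2) (h : pvReach rows b1 s c) : pvReach rows b2 s c := by
  induction h with
  | seed => exact pvReach.seed
  | step p q _ hv hnb ih => exact pvReach.step p q ih hv (fun hc => hnb ((hb q).mpr hc))

-- bounds refutation for neighbours of an inert point (shared by both ports)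
theorem pvInert_nbr_bounds {rows : List (List Int)} {y x a b : Int}
    (h : pvInertPt rows y x)
    (hn : (a = y - 1 ∧ b = x) ∨ (a = y + 1 ∧ b = x) ∨ (a = y ∧ b = x - 1) ∨ (a = y ∧ b = x + 1))
    (c1 : 0 ≤ a) (c2 : a < (rows.length : Int)) (c3 : 0 ≤ b)
    (c4 : b < ((PySem.List.pyGetD rows a []).length : Int)) : False := by
  have hlen : pvRect rows → (PySem.List.pyGetD rows a []).length = pvW rows :=
    fun hr => hr _ (PySem.List.pyGetD_mem rows [] ⟨by omega, c2⟩)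
  rcases hn with ⟨rfl, rfl⟩ | ⟨rfl, rfl⟩ | ⟨rfl, rfl⟩ | ⟨rfl, rfl⟩ <;>
  · rcases h with h | h | h | ⟨hy1, hy2, hx⟩
    · omega
    · omega
    · omega
    · rcases hx with hx | ⟨hr, hw⟩
      · omega
      · have hl := hlen hr
        rcases hw with hw | hw <;> omega

-- an inert low point admits no pvValid step at all
theorem pvInert_valid {rows : List (List Int)} {y x : Int} (h : pvInertPt rows y x)
    (q : Int × Int) : ¬ pvValid rows (y, x) q := by
  rintro ⟨hn, hg, -, -⟩
  obtain ⟨q1, q2⟩ := q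
  obtain ⟨g1, g2, g3, g4⟩ := hg
  simp only [pvNbrOf, Prod.mk.injEq] at hn
  simp only [] at g1 g2 g3 g4
  rcases hn with ⟨rfl, rfl⟩ | ⟨rfl, rfl⟩ | ⟨rfl, rfl⟩ | ⟨rfl, rfl⟩ <;>
  · rcases h with h | h | h | ⟨hy1, hy2, hx⟩
    · omega
    · omega
    · omega
    · rcases hx with hx | ⟨hr, hw⟩
      · omega
      · rcases hw with hw | hw <;> omega

-- an inert low point: A's push loop touches nothing
theorem pvInert_stepA {rows : List (List Int)} {y x : Int} (h : pvInertPt rows y x)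
    (cand : List (Int × Int)) (seen : PySem.Set (Int × Int)) :
    pvStepA rows y x (cand, seen) = (cand, seen) := by
  unfold pvStepA
  apply pvFoldl_id
  intro d hd t
  have hdm : d = ((0 : Int), (1 : Int)) ∨ d = (0, -1) ∨ d = (1, 0) ∨ d = (-1, 0) := by
    simpa [pvNbrs] using hd
  unfold pvInertPt at h
  rcases hdm with rfl | rfl | rfl | rfl <;>
    (split_ifs <;> try rfl) <;>
    (rcases h with h | h | h | ⟨hy1, hy2, hx⟩
     · omega
     · omega
     · omega
     · rcases hx with hx | ⟨hrect, hw⟩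
       · omega
       · have hlen := pvRow_len hrect hy1 hy2
         rcases hw with hw | hw <;> omega)

-- an inert low point: B's enqueue loop touches nothing
theorem pvInert_qstep {rows : List (List Int)} {y x : Int} (h : pvInertPt rows y x)
    (q0 : List (Int × Int)) : pvQStep rows y x q0 = q0 := by
  unfold pvQStep
  apply pvFoldl_id
  intro n hn t
  have hnm : n = (y - 1, x) ∨ n = (y + 1, x) ∨ n = (y, x - 1) ∨ n = (y, x + 1) := by
    simpa using hn
  rw [if_neg]
  rintro ⟨c1, c2, c3, c4, -, -⟩
  obtain ⟨n1, n2⟩ := n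
  simp only [Prod.mk.injEq] at hnm
  simp only [] at c1 c2 c3 c4
  exact pvInert_nbr_bounds h hnm c1 c2 c3 c4

-- named copies of the two fold bodies, for the proofs below (definitionally equal)
def pvAf (rows : List (List Int)) (y x : Int)
    (st : List (Int × Int) × PySem.Set (Int × Int)) (d : Int × Int) :
    List (Int × Int) × PySem.Set (Int × Int) :=
  if y + d.1 < 0 ∨ (rows.length : Int) ≤ y + d.1 then st
  else if x + d.2 < 0 ∨ ((pvRow rows y).length : Int) ≤ x + d.2 then st
  else if pvVal rows (y + d.1) (x + d.2) = 9 then st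
  else if pvVal rows (y + d.1) (x + d.2) ≤ pvVal rows y x then st
  else if (y + d.1, x + d.2) ∈ st.2 then st
  else ((y + d.1, x + d.2) :: st.1, PySem.Set.add st.2 (y + d.1, x + d.2))

theorem pvStepA_eq (rows : List (List Int)) (y x : Int)
    (st : List (Int × Int) × PySem.Set (Int × Int)) :
    pvStepA rows y x st = pvNbrs.foldl (pvAf rows y x) st := rfl

def pvQf (rows : List (List Int)) (y x : Int)
    (acc : List (Int × Int)) (n : Int × Int) : List (Int × Int) :=
  if 0 ≤ n.1 ∧ n.1 < (rows.length : Int) ∧ 0 ≤ n.2 ∧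
      n.2 < ((PySem.List.pyGetD rows n.1 []).length : Int) ∧
      PySem.List.pyGetD (PySem.List.pyGetD rows n.1 []) n.2 0 ≠ 9 ∧
      PySem.List.pyGetD (PySem.List.pyGetD rows y []) x 0 <
        PySem.List.pyGetD (PySem.List.pyGetD rows n.1 []) n.2 0
  then acc ++ [n] else acc

theorem pvQStep_eq (rows : List (List Int)) (y x : Int) (q : List (Int × Int)) :
    pvQStep rows y x q =
      [(y - 1, x), (y + 1, x), (y, x - 1), (y, x + 1)].foldl (pvQf rows y x) q := rfl

-- B's enqueue condition is exactly pvValid, for a neighbour of a good cell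
theorem pvQcond_iff {rows : List (List Int)} {y x : Int} (hR : pvRect rows)
    {n : Int × Int} (hn : pvNbrOf (y, x) n) :
    (0 ≤ n.1 ∧ n.1 < (rows.length : Int) ∧ 0 ≤ n.2 ∧
      n.2 < ((PySem.List.pyGetD rows n.1 []).length : Int) ∧
      PySem.List.pyGetD (PySem.List.pyGetD rows n.1 []) n.2 0 ≠ 9 ∧
      PySem.List.pyGetD (PySem.List.pyGetD rows y []) x 0 <
        PySem.List.pyGetD (PySem.List.pyGetD rows n.1 []) n.2 0)
    ↔ pvValid rows (y, x) n := by
  constructor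
  · rintro ⟨c1, c2, c3, c4, c5, c6⟩
    have hl : (PySem.List.pyGetD rows n.1 []).length = pvW rows :=
      hR _ (PySem.List.pyGetD_mem rows [] ⟨by omega, c2⟩)
    exact ⟨hn, ⟨c1, c2, c3, by omega⟩, c5, c6⟩
  · rintro ⟨-, ⟨g1, g2, g3, g4⟩, h9, hlt⟩
    have hl : (PySem.List.pyGetD rows n.1 []).length = pvW rows :=
      hR _ (PySem.List.pyGetD_mem rows [] ⟨by omega, g2⟩)
    exact ⟨g1, g2, g3, by omega, h9, hlt⟩

-- structure of A's push loop on a good cell: it appends exactly the fresh valid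
-- neighbours to seen, pushes them (reversed) on the stack, and covers every valid one
theorem pvStepA_props {rows : List (List Int)} {y x : Int} (hR : pvRect rows)
    (hG : pvGood rows (y, x)) (cand : List (Int × Int)) (seen : PySem.Set (Int × Int)) :
    (∃ new : List (Int × Int),
      (pvStepA rows y x (cand, seen)).2 = seen ++ new ∧
      (pvStepA rows y x (cand, seen)).1 = new.reverse ++ cand ∧
      new.Nodup ∧
      (∀ n ∈ new, pvValid rows (y, x) n ∧ n ∉ seen)) ∧
    (∀ q, pvValid rows (y, x) q → q ∈ (pvStepA rows y x (cand, seen)).2) := by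
  have hly : (pvRow rows y).length = pvW rows := pvRow_len hR hG.1 hG.2.1
  constructor
  · rw [pvStepA_eq]
    refine pvFoldl_inv (fun st : List (Int × Int) × PySem.Set (Int × Int) =>
      ∃ new : List (Int × Int), st.2 = seen ++ new ∧ st.1 = new.reverse ++ cand ∧
        new.Nodup ∧ ∀ n ∈ new, pvValid rows (y, x) n ∧ n ∉ seen)
      _ pvNbrs (cand, seen) ⟨[], by simp, by simp, List.nodup_nil, by simp⟩ ?_
    rintro d hd t ⟨new, h2, h1, h4, h3⟩
    simp only [pvAf]
    split_ifs with g1 g2 g3 g4 g5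
    · exact ⟨new, h2, h1, h4, h3⟩
    · exact ⟨new, h2, h1, h4, h3⟩
    · exact ⟨new, h2, h1, h4, h3⟩
    · exact ⟨new, h2, h1, h4, h3⟩
    · exact ⟨new, h2, h1, h4, h3⟩
    · have hnb : pvNbrOf (y, x) (y + d.1, x + d.2) := by
        have hdm : d = ((0 : Int), (1 : Int)) ∨ d = (0, -1) ∨ d = (1, 0) ∨ d = (-1, 0) := by
          simpa [pvNbrs] using hd
        rcases hdm with rfl | rfl | rfl | rfl <;> simp [pvNbrOf, Prod.ext_iff] <;> omega
      have hv : pvValid rows (y, x) (y + d.1, x + d.2) := by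
        refine ⟨hnb, ⟨?_, ?_, ?_, ?_⟩, g3, not_le.mp g4⟩
        · show (0 : Int) ≤ y + d.1; omega
        · show y + d.1 < (rows.length : Int); omega
        · show (0 : Int) ≤ x + d.2; omega
        · show x + d.2 < (pvW rows : Int); omega
      have hns : (y + d.1, x + d.2) ∉ seen ++ new := h2 ▸ g5
      refine ⟨new ++ [(y + d.1, x + d.2)], ?_, ?_, ?_, ?_⟩
      · show PySem.Set.add t.2 (y + d.1, x + d.2) = _
        rw [PySem.Set.add_of_not_mem g5, h2, List.append_assoc]
      · show (y + d.1, x + d.2) :: t.1 = _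
        rw [h1]
        simp
      · simp only [List.nodup_append, h4, List.nodup_cons, List.not_mem_nil,
          not_false_iff, List.nodup_nil, and_true, true_and]
        intro a ha b hb
        rw [List.mem_singleton.mp hb]
        intro he
        exact (List.mem_append.not.mp hns) (Or.inr (he ▸ ha))
      · intro m hm
        rcases List.mem_append.mp hm with h | h
        · exact h3 m h
        · rw [List.mem_singleton.mp h]
          exact ⟨hv, fun hc => (List.mem_append.not.mp hns) (Or.inl hc)⟩
  · intro q hq
    obtain ⟨hnb, hg, h9, hlt⟩ := hq
    have hmem : ∀ t : List (Int × Int) × PySem.Set (Int × Int), ∀ d : Int × Int,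
        q ∈ t.2 → q ∈ (pvAf rows y x t d).2 := by
      intro t d ht
      simp only [pvAf]
      split_ifs with g1 g2 g3 g4 g5
      · exact ht
      · exact ht
      · exact ht
      · exact ht
      · exact ht
      · exact pvMem_add_of_mem _ ht
    rw [pvStepA_eq]
    have main : ∀ d : Int × Int, d ∈ pvNbrs → q = (y + d.1, x + d.2) →
        q ∈ (pvNbrs.foldl (pvAf rows y x) (cand, seen)).2 := by
      intro d hd he
      refine pvFoldl_handle (fun st : List (Int × Int) × PySem.Set (Int × Int) => q ∈ st.2)
        (pvAf rows y x) (fun t a ht => hmem t a ht) pvNbrs (cand, seen) d hd ?_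
      intro t
      subst he
      simp only [pvAf]
      rw [if_neg (by obtain ⟨g1, g2, g3, g4⟩ := hg; omega),
        if_neg (by obtain ⟨g1, g2, g3, g4⟩ := hg; omega),
        if_neg h9, if_neg (not_le.mpr hlt)]
      by_cases h5 : (y + d.1, x + d.2) ∈ t.2
      · rw [if_pos h5]; exact h5
      · rw [if_neg h5]; exact pvMem_add_self _ _
    rcases hnb with he | he | he | he
    · exact main (-1, 0) (by simp [pvNbrs]) (by rw [he, Prod.mk.injEq]; constructor <;> ring)
    · exact main (1, 0) (by simp [pvNbrs]) (by rw [he, Prod.mk.injEq]; constructor <;> ring)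
    · exact main (0, -1) (by simp [pvNbrs]) (by rw [he, Prod.mk.injEq]; constructor <;> ring)
    · exact main (0, 1) (by simp [pvNbrs]) (by rw [he, Prod.mk.injEq]; constructor <;> ring)

-- structure of B's enqueue loop on a good cell
theorem pvQStep_props {rows : List (List Int)} {y x : Int} (hR : pvRect rows)
    (q0 : List (Int × Int)) :
    (∃ new : List (Int × Int),
      pvQStep rows y x q0 = q0 ++ new ∧ new.length ≤ 4 ∧
      (∀ n ∈ new, pvValid rows (y, x) n)) ∧
    (∀ q, pvValid rows (y, x) q → q ∈ pvQStep rows y x q0) := by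
  have hL : ∀ n : Int × Int, n ∈ [((y : Int) - 1, x), (y + 1, x), (y, x - 1), (y, x + 1)] →
      pvNbrOf (y, x) n := by
    intro n hn
    have : n = ((y : Int) - 1, x) ∨ n = (y + 1, x) ∨ n = (y, x - 1) ∨ n = (y, x + 1) := by
      simpa using hn
    rcases this with rfl | rfl | rfl | rfl <;> simp [pvNbrOf]
  constructor
  · suffices h : ∀ l : List (Int × Int), (∀ n ∈ l, pvNbrOf (y, x) n) → ∀ acc,
        ∃ new, l.foldl (pvQf rows y x) acc = acc ++ new ∧ new.length ≤ l.length ∧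
          ∀ n ∈ new, pvValid rows (y, x) n by
      obtain ⟨new, h1, h2, h3⟩ := h _ hL q0
      exact ⟨new, by rw [pvQStep_eq]; exact h1, by simpa using h2, h3⟩
    intro l
    induction l with
    | nil => intro _ acc; exact ⟨[], by simp, by simp, by simp⟩
    | cons n l ih =>
        intro hmem acc
        by_cases hC : (0 ≤ n.1 ∧ n.1 < (rows.length : Int) ∧ 0 ≤ n.2 ∧
            n.2 < ((PySem.List.pyGetD rows n.1 []).length : Int) ∧
            PySem.List.pyGetD (PySem.List.pyGetD rows n.1 []) n.2 0 ≠ 9 ∧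
            PySem.List.pyGetD (PySem.List.pyGetD rows y []) x 0 <
              PySem.List.pyGetD (PySem.List.pyGetD rows n.1 []) n.2 0)
        · obtain ⟨new, h1, h2, h3⟩ :=
            ih (fun m hm => hmem m (List.mem_cons_of_mem _ hm)) (acc ++ [n])
          refine ⟨n :: new, ?_, by simp only [List.length_cons]; omega, ?_⟩
          · rw [List.foldl_cons]
            show l.foldl _ (pvQf rows y x acc n) = _
            simp only [pvQf, if_pos hC]
            rw [h1, List.append_assoc]
            rfl
          · intro m hm
            rcases List.mem_cons.mp hm with rfl | hm
            · exact (pvQcond_iff hR (hmem m List.mem_cons_self)).mp hC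
            · exact h3 m hm
        · obtain ⟨new, h1, h2, h3⟩ :=
            ih (fun m hm => hmem m (List.mem_cons_of_mem _ hm)) acc
          refine ⟨new, ?_, by simp only [List.length_cons]; omega, h3⟩
          rw [List.foldl_cons]
          show l.foldl _ (pvQf rows y x acc n) = _
          simp only [pvQf, if_neg hC]
          exact h1
  · intro q hq
    have hmemL : q ∈ [((y : Int) - 1, x), (y + 1, x), (y, x - 1), (y, x + 1)] := by
      rcases hq.1 with h | h | h | h <;> rw [h] <;> simp
    rw [pvQStep_eq]
    refine pvFoldl_handle (fun acc => q ∈ acc) (pvQf rows y x) ?_ _ q0 q hmemL ?_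
    · intro t a ht
      simp only [pvQf]
      split_ifs
      · exact List.mem_append_left _ ht
      · exact ht
    · intro t
      simp only [pvQf, if_pos ((pvQcond_iff hR hq.1).mpr hq)]
      exact List.mem_append_right _ (by simp)

-- A's while loop computes the pvReach-closure of its stack over `seen`
theorem pvWhileA_main {rows : List (List Int)} {lps base : List (Int × Int)} {s : Int × Int}
    (hR : pvRect rows) :
    ∀ (fuel : Nat) (cand : List (Int × Int)) (seen : PySem.Set (Int × Int)) (size : Int),
    pvInv rows lps seen →
    (∀ c ∈ base, c ∈ seen) →
    (∀ c ∈ seen, c ∈ base ∨ pvReach rows base s c) →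
    (∀ c ∈ cand, c ∈ seen ∧ (pvGood rows c ∨ pvInertPt rows c.1 c.2) ∧ pvReach rows base s c) →
    (∀ r ∈ seen, r ∈ cand ∨ ∀ q, pvValid rows r q → q ∈ seen) →
    fuel + seen.length ≥ cand.length + 1 + (lps.length + rows.length * pvW rows) →
    (pvWhileA rows fuel cand seen size).1 + (seen.length : Int) =
        size + cand.length + ((pvWhileA rows fuel cand seen size).2.length : Int) ∧
    (∀ c ∈ seen, c ∈ (pvWhileA rows fuel cand seen size).2) ∧
    pvInv rows lps (pvWhileA rows fuel cand seen size).2 ∧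
    (∀ c ∈ (pvWhileA rows fuel cand seen size).2, c ∈ base ∨ pvReach rows base s c) ∧
    pvClosed rows (pvWhileA rows fuel cand seen size).2 := by
  intro fuel
  induction fuel with
  | zero =>
      intro cand seen size hI hbase hsound hcand hcl hfuel
      cases cand with
      | nil =>
          refine ⟨by simp [pvWhileA], fun c hc => hc, hI, hsound, ?_⟩
          intro r hr q hv
          rcases hcl r hr with h | h
          · simp at h
          · exact h q hv
      | cons c cs =>
          exfalso
          have hb := pvSeen_bound hI
          simp only [List.length_cons] at hfuel
          omega
  | succ fuel ih =>
      intro cand seen size hI hbase hsound hcand hcl hfuel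
      cases cand with
      | nil =>
          refine ⟨by simp [pvWhileA], fun c hc => hc, hI, hsound, ?_⟩
          intro r hr q hv
          rcases hcl r hr with h | h
          · simp at h
          · exact h q hv
      | cons c cs =>
          obtain ⟨hcseen, hcgi, hcreach⟩ := hcand c List.mem_cons_self
          have hun : pvWhileA rows (fuel + 1) (c :: cs) seen size =
              pvWhileA rows fuel (pvStepA rows c.1 c.2 (cs, seen)).1
                (pvStepA rows c.1 c.2 (cs, seen)).2 (size + 1) := rfl
          rw [hun]
          rcases hcgi with hgood | hinert
          · -- expand a good cell via pvStepA_props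
            obtain ⟨⟨new, e2, e1, hnd, hnewp⟩, hhandle⟩ := pvStepA_props hR hgood cs seen
            have len2 : (pvStepA rows c.1 c.2 (cs, seen)).2.length = seen.length + new.length := by
              rw [e2, List.length_append]
            have len1 : (pvStepA rows c.1 c.2 (cs, seen)).1.length = new.length + cs.length := by
              rw [e1, List.length_append, List.length_reverse]
            have hsub : ∀ z, z ∈ seen → z ∈ (pvStepA rows c.1 c.2 (cs, seen)).2 := by
              intro z hz; rw [e2]; exact List.mem_append_left _ hz
            have hsub2 : ∀ z, z ∈ new → z ∈ (pvStepA rows c.1 c.2 (cs, seen)).2 := by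
              intro z hz; rw [e2]; exact List.mem_append_right _ hz
            obtain ⟨f1, f2, f3, f4, f5⟩ := ih (pvStepA rows c.1 c.2 (cs, seen)).1
              (pvStepA rows c.1 c.2 (cs, seen)).2 (size + 1)
              (by
                constructor
                · rw [e2, List.nodup_append]
                  exact ⟨hI.1, hnd, fun a ha b hb he => (hnewp b hb).2 (he ▸ ha)⟩
                · intro z hz
                  rw [e2] at hz
                  rcases List.mem_append.mp hz with h | h
                  · exact hI.2 z h
                  · exact Or.inr (hnewp z h).1.2.1)
              (fun z hz => hsub z (hbase z hz))
              (by
                intro z hz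
                rw [e2] at hz
                rcases List.mem_append.mp hz with h | h
                · exact hsound z h
                · exact Or.inr (pvReach.step c z hcreach (hnewp z h).1
                    (fun hc => (hnewp z h).2 (hbase z hc))))
              (by
                intro m hm
                rw [e1] at hm
                rcases List.mem_append.mp hm with h | h
                · rw [List.mem_reverse] at h
                  exact ⟨hsub2 m h, Or.inl (pvInGrid_good (hnewp m h).1.2.1),
                    pvReach.step c m hcreach (hnewp m h).1
                      (fun hc => (hnewp m h).2 (hbase m hc))⟩
                · obtain ⟨hm1, hm2, hm3⟩ := hcand m (List.mem_cons_of_mem _ h)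
                  exact ⟨hsub m hm1, hm2, hm3⟩)
              (by
                intro r hr
                rw [e2] at hr
                rcases List.mem_append.mp hr with h | h
                · rcases hcl r h with h2 | h2
                  · rcases List.mem_cons.mp h2 with h3 | h3
                    · exact Or.inr (fun q hv => hhandle q (h3 ▸ hv))
                    · refine Or.inl ?_
                      rw [e1]
                      exact List.mem_append_right _ h3
                  · exact Or.inr (fun q hv => hsub q (h2 q hv))
                · refine Or.inl ?_
                  rw [e1]
                  exact List.mem_append_left _ (List.mem_reverse.mpr h))
              (by
                simp only [List.length_cons] at hfuel
                omega)
            refine ⟨?_, fun z hz => f2 z (hsub z hz), f3, f4, f5⟩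
            simp only [List.length_cons]
            omega
          · -- an inert cell pushes nothing
            rw [pvInert_stepA hinert cs seen]
            obtain ⟨f1, f2, f3, f4, f5⟩ := ih cs seen (size + 1) hI hbase hsound
              (fun m hm => hcand m (List.mem_cons_of_mem _ hm))
              (by
                intro r hr
                rcases hcl r hr with h | h
                · rcases List.mem_cons.mp h with h3 | h3
                  · exact Or.inr (fun q hv => absurd (h3 ▸ hv) (pvInert_valid hinert q))
                  · exact Or.inl h3
                · exact Or.inr h)
              (by
                simp only [List.length_cons] at hfuel
                omega)
            refine ⟨?_, f2, f3, f4, f5⟩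
            simp only [List.length_cons]
            omega

-- B's queue scan computes the same closure
theorem pvBFS_main {rows : List (List Int)} {lps base : List (Int × Int)} {s : Int × Int}
    (hR : pvRect rows) :
    ∀ (fuel : Nat) (cand : List (Int × Int)) (seen : PySem.Set (Int × Int)) (size : Int),
    pvInv rows lps seen →
    (∀ c ∈ seen, c ∈ base ∨ pvReach rows base s c) →
    (∀ c ∈ base, c ∈ seen ∨ c = s) →
    (∀ c ∈ cand, (c ∈ base ∨ pvReach rows base s c) ∧
      (pvGood rows c ∨ pvInertPt rows c.1 c.2) ∧ (c ∈ lps ∨ pvInGrid rows c)) →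
    (∀ r ∈ seen, ∀ q, pvValid rows r q → q ∈ seen ∨ q ∈ cand) →
    fuel + 4 * seen.length ≥ cand.length + 4 * (lps.length + rows.length * pvW rows) + 1 →
    (pvBFS rows fuel cand seen size).1 + (seen.length : Int) =
        size + ((pvBFS rows fuel cand seen size).2.length : Int) ∧
    (∀ c ∈ seen, c ∈ (pvBFS rows fuel cand seen size).2) ∧
    (∀ c ∈ cand, c ∈ (pvBFS rows fuel cand seen size).2) ∧
    pvInv rows lps (pvBFS rows fuel cand seen size).2 ∧
    (∀ c ∈ (pvBFS rows fuel cand seen size).2, c ∈ base ∨ pvReach rows base s c) ∧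
    pvClosed rows (pvBFS rows fuel cand seen size).2 := by
  intro fuel
  induction fuel with
  | zero =>
      intro cand seen size hI hsound hbs hcand hcl hfuel
      cases cand with
      | nil =>
          refine ⟨by simp [pvBFS], fun c hc => hc, by simp, hI, hsound, ?_⟩
          intro r hr q hv
          rcases hcl r hr q hv with h | h
          · exact h
          · simp at h
      | cons c cs =>
          exfalso
          have hb := pvSeen_bound hI
          simp only [List.length_cons] at hfuel
          omega
  | succ fuel ih =>
      intro cand seen size hI hsound hbs hcand hcl hfuel
      cases cand with
      | nil =>
          refine ⟨by simp [pvBFS], fun c hc => hc, by simp, hI, hsound, ?_⟩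
          intro r hr q hv
          rcases hcl r hr q hv with h | h
          · exact h
          · simp at h
      | cons c rest =>
          have hun : pvBFS rows (fuel + 1) (c :: rest) seen size =
              if c ∈ seen then pvBFS rows fuel rest seen size
              else pvBFS rows fuel (pvQStep rows c.1 c.2 rest)
                (PySem.Set.add seen c) (size + 1) := rfl
          rw [hun]
          by_cases hcs : c ∈ seen
          · -- lazy skip of an already-seen queue entry
            rw [if_pos hcs]
            obtain ⟨f1, f2, f3, f4, f5, f6⟩ := ih rest seen size hI hsound hbs
              (fun m hm => hcand m (List.mem_cons_of_mem _ hm))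
              (by
                intro r hr q hv
                rcases hcl r hr q hv with h | h
                · exact Or.inl h
                · rcases List.mem_cons.mp h with h3 | h3
                  · exact Or.inl (h3 ▸ hcs)
                  · exact Or.inr h3)
              (by
                simp only [List.length_cons] at hfuel
                omega)
            refine ⟨f1, f2, ?_, f4, f5, f6⟩
            intro m hm
            rcases List.mem_cons.mp hm with rfl | hm
            · exact f2 m hcs
            · exact f3 m hm
          · -- mark, count and enqueue the neighbours
            rw [if_neg hcs]
            obtain ⟨hcR, hcgi, hcM⟩ := hcand c List.mem_cons_self
            have hcReach : pvReach rows base s c := by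
              rcases hcR with hb | h
              · rcases hbs c hb with h' | rfl
                · exact absurd h' hcs
                · exact pvReach.seed
              · exact h
            have hlenadd : (PySem.Set.add seen c).length = seen.length + 1 :=
              pvLen_add_of_not_mem hcs
            have hmemadd : ∀ z, z ∈ seen → z ∈ PySem.Set.add seen c :=
              fun z hz => pvMem_add_of_mem _ hz
            rcases hcgi with hgood | hinert
            · obtain ⟨⟨new, e1, elen, hnewv⟩, hhandle⟩ := pvQStep_props hR rest
              have lenq : (pvQStep rows c.1 c.2 rest).length = rest.length + new.length := by
                rw [e1, List.length_append]
              obtain ⟨f1, f2, f3, f4, f5, f6⟩ := ih (pvQStep rows c.1 c.2 rest)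
                (PySem.Set.add seen c) (size + 1)
                (pvInv_add hI hcs hcM)
                (by
                  intro z hz
                  rcases pvMem_add_iff.mp hz with h | rfl
                  · exact hsound z h
                  · exact hcR)
                (by
                  intro z hz
                  rcases hbs z hz with h | rfl
                  · exact Or.inl (hmemadd z h)
                  · exact Or.inr rfl)
                (by
                  intro m hm
                  rw [e1] at hm
                  rcases List.mem_append.mp hm with h | h
                  · exact hcand m (List.mem_cons_of_mem _ h)
                  · have hv := hnewv m h
                    refine ⟨?_, Or.inl (pvInGrid_good hv.2.1), Or.inr hv.2.1⟩
                    by_cases hmb : m ∈ base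
                    · exact Or.inl hmb
                    · exact Or.inr (pvReach.step c m hcReach hv hmb))
                (by
                  intro r hr q hv
                  rcases pvMem_add_iff.mp hr with h | rfl
                  · rcases hcl r h q hv with h2 | h2
                    · exact Or.inl (hmemadd q h2)
                    · rcases List.mem_cons.mp h2 with h3 | h3
                      · exact Or.inl (h3 ▸ pvMem_add_self seen c)
                      · exact Or.inr (by rw [e1]; exact List.mem_append_left _ h3)
                  · exact Or.inr (hhandle q hv))
                (by
                  simp only [List.length_cons] at hfuel
                  omega)
              refine ⟨by omega, fun z hz => f2 z (hmemadd z hz), ?_, f4, f5, f6⟩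
              intro m hm
              rcases List.mem_cons.mp hm with rfl | hm
              · exact f2 m (pvMem_add_self _ _)
              · exact f3 m (by rw [e1]; exact List.mem_append_left _ hm)
            · -- inert: nothing is enqueued
              rw [pvInert_qstep hinert rest]
              obtain ⟨f1, f2, f3, f4, f5, f6⟩ := ih rest (PySem.Set.add seen c) (size + 1)
                (pvInv_add hI hcs hcM)
                (by
                  intro z hz
                  rcases pvMem_add_iff.mp hz with h | rfl
                  · exact hsound z h
                  · exact hcR)
                (by
                  intro z hz
                  rcases hbs z hz with h | rfl
                  · exact Or.inl (hmemadd z h)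
                  · exact Or.inr rfl)
                (fun m hm => hcand m (List.mem_cons_of_mem _ hm))
                (by
                  intro r hr q hv
                  rcases pvMem_add_iff.mp hr with h | rfl
                  · rcases hcl r h q hv with h2 | h2
                    · exact Or.inl (hmemadd q h2)
                    · rcases List.mem_cons.mp h2 with h3 | h3
                      · exact Or.inl (h3 ▸ pvMem_add_self seen c)
                      · exact Or.inr h3
                  · exact absurd hv (pvInert_valid hinert q))
                (by
                  simp only [List.length_cons] at hfuel
                  omega)
              refine ⟨by omega, fun z hz => f2 z (hmemadd z hz), ?_, f4, f5, f6⟩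
              intro m hm
              rcases List.mem_cons.mp hm with rfl | hm
              · exact f2 m (pvMem_add_self _ _)
              · exact f3 m hm

-- one step of B's low-point fold, named for the proofs
def pvStepB (rows : List (List Int)) (fb : Nat)
    (st : List Int × PySem.Set (Int × Int)) (p : Int × Int) :
    List Int × PySem.Set (Int × Int) :=
  if p ∈ st.2 then st
  else
    let r := pvBFS rows fb [p] st.2 0
    (st.1 ++ [r.1], r.2)

-- the two low-point loops produce the same list of basin sizes
theorem pvLoop_sim {rows : List (List Int)} {lps : List (Int × Int)} :
    ∀ (ps : List (Int × Int)) (sizes : List Int) (sA sB : PySem.Set (Int × Int)),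
    (∀ p ∈ ps, p ∈ lps ∧ (pvInertPt rows p.1 p.2 ∨ (pvRect rows ∧ pvGood rows p))) →
    pvInv rows lps sA → pvInv rows lps sB → pvClosed rows sA → pvClosed rows sB →
    (∀ c, c ∈ sA ↔ c ∈ sB) → sA.length = sB.length →
    (pvLoopA rows (pvFuel rows lps) ps (sizes, sA)).1 =
      (ps.foldl (pvStepB rows (pvFuelB rows lps)) (sizes, sB)).1 := by
  intro ps
  induction ps with
  | nil => intro sizes sA sB _ _ _ _ _ _ _; rfl
  | cons p ps ihp =>
      intro sizes sA sB hps hIA hIB hCA hCB hmemb hlen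
      obtain ⟨hplps, hpshape⟩ := hps p List.mem_cons_self
      have eA : pvLoopA rows (pvFuel rows lps) (p :: ps) (sizes, sA) =
          if p ∈ sA then pvLoopA rows (pvFuel rows lps) ps (sizes, sA)
          else pvLoopA rows (pvFuel rows lps) ps
            (sizes ++ [(pvWhileA rows (pvFuel rows lps) [p] (PySem.Set.add sA p) 0).1],
             (pvWhileA rows (pvFuel rows lps) [p] (PySem.Set.add sA p) 0).2) := rfl
      have eB : (p :: ps).foldl (pvStepB rows (pvFuelB rows lps)) (sizes, sB) =
          ps.foldl (pvStepB rows (pvFuelB rows lps))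
            (if p ∈ sB then (sizes, sB)
             else (sizes ++ [(pvBFS rows (pvFuelB rows lps) [p] sB 0).1],
               (pvBFS rows (pvFuelB rows lps) [p] sB 0).2)) := by
        rw [List.foldl_cons]
        congr 1
      rw [eA, eB]
      by_cases hpA : p ∈ sA
      · have hpB : p ∈ sB := (hmemb p).mp hpA
        rw [if_pos hpA, if_pos hpB]
        exact ihp sizes sA sB (fun m hm => hps m (List.mem_cons_of_mem _ hm))
          hIA hIB hCA hCB hmemb hlen
      · have hpB : p ∉ sB := fun h => hpA ((hmemb p).mpr h)
        rw [if_neg hpA, if_neg hpB]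
        have hIA' : pvInv rows lps (PySem.Set.add sA p) := pvInv_add hIA hpA (Or.inl hplps)
        have hIB' : pvInv rows lps (PySem.Set.add sB p) := pvInv_add hIB hpB (Or.inl hplps)
        have hlenA : (PySem.Set.add sA p).length = sA.length + 1 := pvLen_add_of_not_mem hpA
        have hlenB : (PySem.Set.add sB p).length = sB.length + 1 := pvLen_add_of_not_mem hpB
        have hbase_memb : ∀ z, z ∈ PySem.Set.add sA p ↔ z ∈ PySem.Set.add sB p := by
          intro z; rw [pvMem_add_iff, pvMem_add_iff, hmemb z]
        rcases hpshape with hinert | ⟨hrect, hgood⟩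
        · -- an inert low point: a one-cell basin on both sides
          obtain ⟨k, hk⟩ : ∃ k, pvFuel rows lps = k + 1 :=
            ⟨(rows.map List.length).sum + lps.length, rfl⟩
          have eW : pvWhileA rows (pvFuel rows lps) [p] (PySem.Set.add sA p) 0 =
              (1, PySem.Set.add sA p) := by
            rw [hk]
            have e1 : pvStepA rows p.1 p.2 ([], PySem.Set.add sA p) =
                ([], PySem.Set.add sA p) := pvInert_stepA hinert _ _
            show pvWhileA rows k (pvStepA rows p.1 p.2 ([], PySem.Set.add sA p)).1
              (pvStepA rows p.1 p.2 ([], PySem.Set.add sA p)).2 (0 + 1) = _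
            rw [e1]
            show pvWhileA rows k [] (sA.add p) (0 + 1) = _
            simp [pvWhileA]
          obtain ⟨m, hm⟩ : ∃ m, pvFuelB rows lps = m + 1 :=
            ⟨4 * (lps.length + rows.length * (rows.headD []).length) + 3, rfl⟩
          have eQ : pvBFS rows (pvFuelB rows lps) [p] sB 0 = (1, PySem.Set.add sB p) := by
            rw [hm]
            show (if p ∈ sB then pvBFS rows m [] sB 0
              else pvBFS rows m (pvQStep rows p.1 p.2 []) (PySem.Set.add sB p) (0 + 1)) = _
            rw [if_neg hpB, pvInert_qstep hinert]
            show pvBFS rows m [] (sB.add p) (0 + 1) = _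
            simp [pvBFS]
          rw [eW, eQ]
          refine ihp (sizes ++ [1]) (PySem.Set.add sA p) (PySem.Set.add sB p)
            (fun m hm => hps m (List.mem_cons_of_mem _ hm)) hIA' hIB' ?_ ?_ hbase_memb (by omega)
          · intro r hr q hv
            rcases pvMem_add_iff.mp hr with h | rfl
            · exact pvMem_add_of_mem _ (hCA r h q hv)
            · exact absurd hv (pvInert_valid hinert q)
          · intro r hr q hv
            rcases pvMem_add_iff.mp hr with h | rfl
            · exact pvMem_add_of_mem _ (hCB r h q hv)
            · exact absurd hv (pvInert_valid hinert q)
        · -- a good low point: both sides flood the same pvReach-closure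
          obtain ⟨a1, a2, a3, a4, a5⟩ :=
            pvWhileA_main (lps := lps) (base := PySem.Set.add sA p) (s := p) hrect
              (pvFuel rows lps) [p] (PySem.Set.add sA p) 0 hIA'
              (fun c hc => hc) (fun c hc => Or.inl hc)
              (by
                intro c hc
                have := List.mem_singleton.mp hc
                subst this
                exact ⟨pvMem_add_self _ _, Or.inl hgood, pvReach.seed⟩)
              (by
                intro r hr
                rcases pvMem_add_iff.mp hr with h | rfl
                · exact Or.inr (fun q hv => pvMem_add_of_mem _ (hCA r h q hv))
                · exact Or.inl (by simp))
              (by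
                have hs := pvSumLen hrect
                have hb := pvSeen_bound hIA
                unfold pvFuel
                simp only [List.length_cons, List.length_nil]
                omega)
          obtain ⟨b1, b2, b3, b4, b5, b6⟩ :=
            pvBFS_main (lps := lps) (base := PySem.Set.add sB p) (s := p) hrect
              (pvFuelB rows lps) [p] sB 0 hIB
              (fun c hc => Or.inl (pvMem_add_of_mem _ hc))
              (by
                intro c hc
                rcases pvMem_add_iff.mp hc with h | rfl
                · exact Or.inl h
                · exact Or.inr rfl)
              (by
                intro c hc
                have := List.mem_singleton.mp hc
                subst this
                exact ⟨Or.inl (pvMem_add_self _ _), Or.inl hgood, Or.inl hplps⟩)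
              (fun r hr q hv => Or.inl (hCB r hr q hv))
              (by
                unfold pvFuelB
                rw [show (rows.headD []).length = pvW rows from rfl]
                simp only [List.length_cons, List.length_nil]
                omega)
          have hreachA : ∀ z, pvReach rows (PySem.Set.add sA p) p z →
              z ∈ (pvWhileA rows (pvFuel rows lps) [p] (PySem.Set.add sA p) 0).2 := by
            intro z hz
            induction hz with
            | seed => exact a2 p (pvMem_add_self _ _)
            | step p' q' _ hv _ ih' => exact a5 p' ih' q' hv
          have hreachB : ∀ z, pvReach rows (PySem.Set.add sB p) p z →
              z ∈ (pvBFS rows (pvFuelB rows lps) [p] sB 0).2 := by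
            intro z hz
            induction hz with
            | seed => exact b3 p List.mem_cons_self
            | step p' q' _ hv _ ih' => exact b6 p' ih' q' hv
          have hchA : ∀ z, z ∈ (pvWhileA rows (pvFuel rows lps) [p] (PySem.Set.add sA p) 0).2 ↔
              (z ∈ sA ∨ pvReach rows (PySem.Set.add sA p) p z) := by
            intro z
            constructor
            · intro hz
              rcases a4 z hz with h | h
              · rcases pvMem_add_iff.mp h with h2 | rfl
                · exact Or.inl h2
                · exact Or.inr pvReach.seed
              · exact Or.inr h
            · rintro (h | h)
              · exact a2 z (pvMem_add_of_mem _ h)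
              · exact hreachA z h
          have hchB : ∀ z, z ∈ (pvBFS rows (pvFuelB rows lps) [p] sB 0).2 ↔
              (z ∈ sB ∨ pvReach rows (PySem.Set.add sB p) p z) := by
            intro z
            constructor
            · intro hz
              rcases b5 z hz with h | h
              · rcases pvMem_add_iff.mp h with h2 | rfl
                · exact Or.inl h2
                · exact Or.inr pvReach.seed
              · exact Or.inr h
            · rintro (h | h)
              · exact b2 z h
              · exact hreachB z h
          have hFmemb : ∀ z, z ∈ (pvWhileA rows (pvFuel rows lps) [p] (PySem.Set.add sA p) 0).2 ↔
              z ∈ (pvBFS rows (pvFuelB rows lps) [p] sB 0).2 := by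
            intro z
            rw [hchA, hchB]
            exact or_congr (hmemb z)
              ⟨pvReach_congr hbase_memb, pvReach_congr (fun x => (hbase_memb x).symm)⟩
          have hFlen : (pvWhileA rows (pvFuel rows lps) [p] (PySem.Set.add sA p) 0).2.length =
              (pvBFS rows (pvFuelB rows lps) [p] sB 0).2.length :=
            pvLen_eq_of_memb a3.1 b4.1 hFmemb
          have hsz : (pvWhileA rows (pvFuel rows lps) [p] (PySem.Set.add sA p) 0).1 =
              (pvBFS rows (pvFuelB rows lps) [p] sB 0).1 := by
            simp only [List.length_cons, List.length_nil] at a1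
            omega
          rw [hsz]
          exact ihp _ _ _ (fun m hm => hps m (List.mem_cons_of_mem _ hm)) a3 b4 a5 b6
            hFmemb hFlen

-- ===== VERDICT (by name: the statement is the Claim_ definition above) =====
theorem solve_gold_spec : Claim_equal_solve_gold := by
  intro rows lps hDom hPre
  unfold Spec_solve_gold solve_gold
  have halt : solve_gold_alt rows lps =
      (PySem.List.slice (PySem.List.sorted
        (lps.foldl (pvStepB rows (pvFuelB rows lps)) ([], PySem.Set.empty)).1
        (fun z => z) true) none (some 3)).foldl (· * ·) 1 := rfl
  rw [halt]
  have h := pvLoop_sim (rows := rows) (lps := lps) lps [] PySem.Set.empty PySem.Set.empty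
    (fun p hp => ⟨hp, hPre p hp⟩)
    ⟨List.nodup_nil, by intro c hc; simp [PySem.Set.empty] at hc⟩
    ⟨List.nodup_nil, by intro c hc; simp [PySem.Set.empty] at hc⟩
    (by intro r hr; simp [PySem.Set.empty] at hr)
    (by intro r hr; simp [PySem.Set.empty] at hr)
    (fun c => Iff.rfl) rfl
  rw [h]
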